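-- pv_equiv track=rewrite | github.com/2203juan/algorithm_workshops | python/palabras/palabras.py | sustantivosPlurales
-- ===== SOURCE A (Python) =====
-- def sustantivosPlurales(palabras):
--     """
--     La funcion recibe la lista de palabras y revisa los posibles sustantivos plurales,
--     se tomand dos casos en cuenta: el primero es que hay un articulo plurar y lo siguiente
--     a este es una palabra que termina en "s" y el otro caso es que la palabra termine en "s"
--     """
--     articulosPlurales = ["los","las","unos","unas"] # esta lista contiene los articulos que preceden a posibles plurales
--     sustPlurales = []
--     i = 0
--     while i < len(palabras):
--         if(palabras[i] in articulosPlurales and i+1 < len(palabras) and palabras[i+1][-1] == "s" and palabras[i+1] not in articulosPlurales):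
--             sustPlurales.append(palabras[i+1])
--             i += 2
--         elif(palabras[i][-1] == "s" and palabras[i] not in articulosPlurales):
--             sustPlurales.append(palabras[i])
--             i += 1
--         else:
--             i+=1
--     return sustPlurales
-- ===== SOURCE B (Python) =====
-- def sustantivosPlurales(palabras):
--     articulosPlurales = ["los", "las", "unos", "unas"]
--     return [w for w in palabras if w[-1] == "s" and w not in articulosPlurales]
-- ===== Notes on version B (the rewrite author's own statement) =====
-- stated objective: simpler
-- what changed: Replaces the indexed while-loop with a look-ahead append and conditional i+=2 skip by one uniform comprehension: the look-ahead branch is redundant because every appended word is exactly a word ending in 's' that is not one of the four articles.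
import Mathlib
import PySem

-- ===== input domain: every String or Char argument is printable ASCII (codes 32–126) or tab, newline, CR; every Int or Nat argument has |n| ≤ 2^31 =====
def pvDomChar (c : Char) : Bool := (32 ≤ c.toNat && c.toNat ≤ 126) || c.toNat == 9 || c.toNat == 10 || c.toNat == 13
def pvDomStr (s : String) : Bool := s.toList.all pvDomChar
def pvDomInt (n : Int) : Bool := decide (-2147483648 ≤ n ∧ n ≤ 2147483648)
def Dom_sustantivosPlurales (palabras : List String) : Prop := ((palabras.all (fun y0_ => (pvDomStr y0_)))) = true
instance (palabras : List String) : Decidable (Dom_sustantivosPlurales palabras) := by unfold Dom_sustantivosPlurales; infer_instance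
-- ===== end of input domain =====

-- B replaces A's indexed while-loop (look-ahead append + conditional skip of two) by one
-- uniform filter pass: simpler, same O(n) cost.


-- ===== PORT A =====
-- articulosPlurales of A
def artsA : List String := ["los", "las", "unos", "unas"]

-- Python s[-1] (raises on empty string; `none` there)
def lastChar (s : String) : Option Char := PySem.Str.pyGet? s (-1)

-- the while-loop of A as structural recursion on the list: the two-element head view is
-- exactly A's look at palabras[i] and palabras[i+1]; the i+=2 skip is recursing past q.
def loopA : List String → List String
  | [] => []
  | [p] => if lastChar p = some 's' ∧ p ∉ artsA then [p] else []
  | p :: q :: rest =>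
    if p ∈ artsA ∧ lastChar q = some 's' ∧ q ∉ artsA then
      q :: loopA rest
    else if lastChar p = some 's' ∧ p ∉ artsA then
      p :: loopA (q :: rest)
    else
      loopA (q :: rest)

def sustantivosPlurales (palabras : List String) : List String := loopA palabras

-- ===== PORT B =====
def artsB : List String := ["los", "las", "unos", "unas"]

def sustantivosPlurales_alt (palabras : List String) : List String :=
  palabras.filter (fun w => lastChar w == some 's' && !(artsB.contains w))

-- ===== PRECONDITION & SPEC =====
-- Pre_ excludes inputs containing the empty string, on which Python A raises IndexError at w[-1].
def Pre_sustantivosPlurales (palabras : List String) : Prop := "" ∉ palabras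
instance (palabras : List String) : Decidable (Pre_sustantivosPlurales palabras) := by unfold Pre_sustantivosPlurales; infer_instance
def pvWitness_sustantivosPlurales : List String := ["los", "perros", "casa", "mesas"]

def Spec_sustantivosPlurales (palabras : List String) (out : List String) : Prop := out = sustantivosPlurales_alt palabras
instance (palabras : List String) (out : List String) : Decidable (Spec_sustantivosPlurales palabras out) := by unfold Spec_sustantivosPlurales; infer_instance

-- ===== CLAIM (what is proved, stated in full; the proofs are below) =====
def Claim_equal_sustantivosPlurales : Prop := ∀ (palabras : List String), Dom_sustantivosPlurales palabras → Pre_sustantivosPlurales palabras → Spec_sustantivosPlurales palabras (sustantivosPlurales palabras)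

-- ===== LEMMAS AND PROOFS =====

def predB (w : String) : Bool := lastChar w == some 's' && !(artsB.contains w)

theorem predB_false_of_art {p : String} (h : p ∈ artsA) : predB p = false := by
  fin_cases h <;> decide

theorem predB_true {q : String} (h1 : lastChar q = some 's') (h2 : q ∉ artsA) :
    predB q = true := by
  simp [predB, h1, artsB]
  simpa [artsA] using h2

theorem predB_false_of_not {p : String} (h : ¬(lastChar p = some 's' ∧ p ∉ artsA)) :
    predB p = false := by
  simp [predB]
  intro h1
  by_contra hc
  simp at hc
  exact h ⟨h1, by simpa [artsA, artsB] using hc⟩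

theorem loopA_eq_filter : ∀ xs : List String, loopA xs = xs.filter predB
  | [] => rfl
  | [p] => by
    by_cases h : lastChar p = some 's' ∧ p ∉ artsA
    · simp [loopA, h, List.filter, predB_true h.1 h.2]
    · simp [loopA, h, List.filter, predB_false_of_not h]
  | p :: q :: rest => by
    by_cases hC : p ∈ artsA ∧ lastChar q = some 's' ∧ q ∉ artsA
    · have hp : predB p = false := predB_false_of_art hC.1
      have hq : predB q = true := predB_true hC.2.1 hC.2.2
      simp [loopA, hC, List.filter, hp, hq, loopA_eq_filter rest]
    · by_cases hD : lastChar p = some 's' ∧ p ∉ artsA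
      · have hp : predB p = true := predB_true hD.1 hD.2
        simp only [loopA, if_neg hC, if_pos hD, loopA_eq_filter (q :: rest), List.filter, hp]
      · have hp : predB p = false := predB_false_of_not hD
        simp only [loopA, if_neg hC, if_neg hD, loopA_eq_filter (q :: rest), List.filter, hp]

-- ===== VERDICT (by name: the statement is the Claim_ definition above) =====
theorem sustantivosPlurales_spec : Claim_equal_sustantivosPlurales := by
  intro palabras _ _
  unfold Spec_sustantivosPlurales sustantivosPlurales sustantivosPlurales_alt
  exact loopA_eq_filter palabras
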